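-- pv_equiv track=rewrite | github.com/Xdvy/xdvyturing | src/xdvyturing/defi8/defi8.py | area_closest_square
-- ===== SOURCE A (Python) =====
-- import math
--
-- def count_squares_in_rectangle(n: int, m: int) -> int:
--     '''
--     Compute the number of square that can be drawn in a rectangle of nxm.
--
--     :param n: length of the square/rectangle
--     :type n: int
--     :param m: width of the square/rectangle
--     :type m: int
--     '''
--
--     # L'aire est égale au nombre de carrés de 1
--     # Pour savoir le nombre de carré de 2 possibles dans un rectangle de nxm : (n-1)*(m-1)
--     # Pour calculer le nombre de carré de 3 possibles dans un rectangle de nxm : (n-2)*(m-2)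
--     # Pour calculer le nombre de carré de l possibles dans un rectangle de nxm : (n+1-l)*(m+1-l)
--
--     if n < 1 or m < 1:
--         raise ValueError("n and m must be >= 1")
--
--     count = 0
--     for i in range(min(n,m)) :
--         count += (n-i)*(m-i)
--     return count
--
-- def rectangles_with_exactly_n_squares(n: int) :
--     '''
--     Yield all rectangle dimensions (i, j) such that the rectangle contains exactly n squares.
--
--     :param n: number of square that can be drawn in the rectangle
--     :type n: int
--     :return: generator
--     '''
--
--     if n < 1 :
--         raise ValueError("n must be >= 1")
--
--     max_len = int(math.sqrt(n))+1
--     return ((height,width) for height in range(1,max_len) for width in range(height,max_len) if count_squares_in_rectangle(height,width)==n)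
--
-- def area_closest_square(n: int) :
--     '''
--     Compute the area of the rectangles containing n squares and return the one with the closest shape of a square.
--
--     :param n: number of square that can be drawn in the rectangle
--     :type n: int
--     '''
--
--     if n < 1 :
--         raise ValueError("n must be >= 1")
--
--     best = None
--     for height,width in rectangles_with_exactly_n_squares(n) :
--         if best is None or abs(height-width) < abs(best[1]-best[0]) :
--             best = (height,width)
--
--     return best
-- ===== SOURCE B (Python) =====
-- import math
--
-- def area_closest_square(n):
--     # For height h <= width w, the number of squares in an h x w rectangle is
--     # affine in w:  count(h, w) = T(h)*(w - h) + Q(h)  with T(h) = h(h+1)/2,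
--     # Q(h) = h(h+1)(2h+1)/6.  So for each height there is at most ONE width with
--     # exactly n squares, computed directly by division instead of scanning all
--     # widths and re-summing the count each time.
--     if n < 1:
--         raise ValueError("n must be >= 1")
--     r = math.isqrt(n)  # search bound: same bound as the spec (heights/widths up to int(sqrt(n)))
--     best = None
--     for h in range(1, r + 1):
--         t = h * (h + 1) // 2
--         q = h * (h + 1) * (2 * h + 1) // 6
--         d = n - q
--         if d >= 0 and d % t == 0:
--             w = h + d // t
--             if w <= r and (best is None or w - h < abs(best[1] - best[0])):
--                 best = (h, w)
--     return best
-- ===== Notes on version B (the rewrite author's own statement) =====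
-- stated objective: faster
-- what changed: Replaces the double scan over (height,width) pairs with an inner O(h) square-count re-summation by a single loop over heights that computes the unique matching width in O(1) from the closed form count(h,w)=T(h)(w-h)+Q(h).
import Mathlib
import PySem

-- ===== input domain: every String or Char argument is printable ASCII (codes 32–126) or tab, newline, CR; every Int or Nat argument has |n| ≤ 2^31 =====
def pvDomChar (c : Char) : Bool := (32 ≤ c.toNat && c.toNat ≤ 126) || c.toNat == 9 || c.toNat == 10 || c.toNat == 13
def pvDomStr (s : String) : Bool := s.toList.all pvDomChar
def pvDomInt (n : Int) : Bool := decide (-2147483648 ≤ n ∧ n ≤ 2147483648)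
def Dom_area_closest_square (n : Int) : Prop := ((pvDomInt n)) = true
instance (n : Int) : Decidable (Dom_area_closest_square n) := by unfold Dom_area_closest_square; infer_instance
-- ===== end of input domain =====

-- B replaces A's double scan over (height,width) pairs (each re-summing the square count)
-- by one loop over heights computing the unique matching width in closed form.


-- ===== PORT A =====
-- A's helper; its ValueError guard (n < 1 or m < 1) is unreachable from area_closest_square,
-- which only calls it with 1 ≤ height ≤ width, so the port is total here.
def count_squares_in_rectangle (n m : Int) : Int :=
  (PySem.List.pyRange 0 (min n m) 1).foldl (fun count i => count + (n - i) * (m - i)) 0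

-- A's generator, ported as the list of pairs it yields; its own n < 1 raise is unreachable
-- (area_closest_square checks n < 1 before iterating it).
-- int(math.sqrt(n)) = Int.sqrt n exactly for 0 ≤ n ≤ 2^31 (the stated domain).
def rectangles_with_exactly_n_squares (n : Int) : List (Int × Int) :=
  let maxLen : Int := Int.sqrt n + 1
  (PySem.List.pyRange 1 maxLen 1).flatMap (fun height =>
    ((PySem.List.pyRange height maxLen 1).filter
        (fun width => count_squares_in_rectangle height width == n)).map (fun width => (height, width)))

def area_closest_square (n : Int) : Option (List Int) :=
  if n < 1 then none  -- raise ValueError — excluded by Pre_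
  else
    ((rectangles_with_exactly_n_squares n).foldl (fun best hw =>
        match best with
        | none => some hw
        | some (bh, bw) => if |hw.1 - hw.2| < |bw - bh| then some hw else best) none).map
      (fun p => [p.1, p.2])

-- ===== PORT B =====
def area_closest_square_alt (n : Int) : Option (List Int) :=
  if n < 1 then none  -- raise ValueError — excluded by Pre_
  else
    let r : Int := Int.sqrt n  -- math.isqrt(n)
    ((PySem.List.pyRange 1 (r + 1) 1).foldl (fun best h =>
        let t := PySem.Int.floordiv (h * (h + 1)) 2
        let q := PySem.Int.floordiv (h * (h + 1) * (2 * h + 1)) 6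
        let d := n - q
        if 0 ≤ d ∧ PySem.Int.mod d t = 0 then
          let w := h + PySem.Int.floordiv d t
          if w ≤ r then
            match best with
            | none => some (h, w)
            | some (bh, bw) => if w - h < |bw - bh| then some (h, w) else best
          else best
        else best) none).map (fun p => [p.1, p.2])

-- ===== PRECONDITION & SPEC =====
-- Pre_ excludes exactly n < 1, where the Python A raises ValueError.
def Pre_area_closest_square (n : Int) : Prop := 1 ≤ n
instance (n : Int) : Decidable (Pre_area_closest_square n) := by unfold Pre_area_closest_square; infer_instance
def pvWitness_area_closest_square : Int := 5

def Spec_area_closest_square (n : Int) (out : Option (List Int)) : Prop := out = area_closest_square_alt n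
instance (n : Int) (out : Option (List Int)) : Decidable (Spec_area_closest_square n out) := by unfold Spec_area_closest_square; infer_instance

-- ===== CLAIM (what is proved, stated in full; the proofs are below) =====
def Claim_equal_area_closest_square : Prop := ∀ (n : Int), Dom_area_closest_square n → Pre_area_closest_square n → Spec_area_closest_square n (area_closest_square n)

-- ===== LEMMAS AND PROOFS =====

-- closed form of the square count, built up at the list level
theorem pv_sum_lin (k : ℕ) (w : ℤ) :
    2 * ((List.range k).map (fun i : ℕ => (w - (i : ℤ)))).sum = k * (2 * w - k + 1) := by
  induction k with
  | zero => simp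
  | succ k ih =>
    rw [List.range_succ]
    simp only [List.map_append, List.sum_append, List.map_cons, List.map_nil, List.sum_cons,
      List.sum_nil]
    push_cast
    push_cast at ih
    nlinarith [ih]

theorem pv_sum_sq (k : ℕ) (w : ℤ) :
    6 * ((List.range k).map (fun i : ℕ => ((k : ℤ) - i) * (w - i))).sum
      = (k : ℤ) * (k + 1) * (3 * w - k + 1) := by
  induction k with
  | zero => simp
  | succ k ih =>
    rw [List.range_succ]
    have hfun : (fun i : ℕ => (((k + 1 : ℕ) : ℤ) - i) * (w - i))
        = fun i : ℕ => (((k : ℤ) - i) * (w - i)) + (w - (i : ℤ)) := by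
      funext i; push_cast; ring
    simp only [hfun, List.map_append, List.sum_append, List.map_cons, List.map_nil,
      List.sum_cons, List.sum_nil, List.sum_map_add]
    push_cast
    push_cast at ih
    nlinarith [ih, pv_sum_lin k w]

theorem pv_ct_closed (h w : ℤ) (h0 : 0 ≤ h) (hw : h ≤ w) :
    6 * count_squares_in_rectangle h w = h * (h + 1) * (3 * w - h + 1) := by
  have hmin : min h w = h := min_eq_left hw
  have hrange : PySem.List.pyRange 0 h 1 = (List.range h.toNat).map (fun k : ℕ => (k : ℤ)) := by
    rw [PySem.List.pyRange_one]; simp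
  have hcast : ((h.toNat : ℤ)) = h := Int.toNat_of_nonneg h0
  rw [count_squares_in_rectangle, hmin, hrange, PySem.List.foldl_add, List.map_map]
  have : ((fun i => (h - i) * (w - i)) ∘ fun k : ℕ => (k : ℤ))
      = fun i : ℕ => ((h.toNat : ℤ) - i) * (w - i) := by
    funext i; simp [hcast]
  rw [this, zero_add, pv_sum_sq h.toNat w, hcast]

-- t = h(h+1)//2 is positive and exact
theorem pv_t_spec (h : ℤ) (hh : 1 ≤ h) :
    0 < PySem.Int.floordiv (h * (h + 1)) 2 ∧
      2 * PySem.Int.floordiv (h * (h + 1)) 2 = h * (h + 1) := by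
  have hdvd : (2 : ℤ) ∣ h * (h + 1) := (Int.even_mul_succ_self h).two_dvd
  have hex : 2 * PySem.Int.floordiv (h * (h + 1)) 2 = h * (h + 1) := by
    rw [PySem.Int.floordiv_eq_ediv_of_pos (by norm_num)]
    exact Int.mul_ediv_cancel' hdvd
  refine ⟨?_, hex⟩
  nlinarith [hex]

-- q = h(h+1)(2h+1)//6 is exact (it equals the square count of the h×h square)
theorem pv_q_spec (h : ℤ) (hh : 1 ≤ h) :
    6 * PySem.Int.floordiv (h * (h + 1) * (2 * h + 1)) 6 = h * (h + 1) * (2 * h + 1) := by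
  have hc := pv_ct_closed h h (by omega) le_rfl
  have hdvd : (6 : ℤ) ∣ h * (h + 1) * (2 * h + 1) := by
    refine ⟨count_squares_in_rectangle h h, ?_⟩
    linear_combination -hc
  rw [PySem.Int.floordiv_eq_ediv_of_pos (by norm_num)]
  exact Int.mul_ediv_cancel' hdvd

-- the count is affine in the width
theorem pv_ct_affine (n h w : ℤ) (hh : 1 ≤ h) (hw : h ≤ w) :
    (count_squares_in_rectangle h w = n) ↔
      (PySem.Int.floordiv (h * (h + 1)) 2) * (w - h)
        + PySem.Int.floordiv (h * (h + 1) * (2 * h + 1)) 6 = n := by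
  obtain ⟨ht0, ht⟩ := pv_t_spec h hh
  have hq := pv_q_spec h hh
  have hc := pv_ct_closed h w (by omega) hw
  constructor
  · intro he; nlinarith [hc, ht, hq]
  · intro he; nlinarith [hc, ht, hq]

-- the per-height step of A (scan all widths, re-summing the count) equals B's closed-form step
theorem pv_inner (n r h : ℤ) (hh : 1 ≤ h) (best : Option (ℤ × ℤ)) :
    (((PySem.List.pyRange h (r + 1) 1).filter
          (fun width => count_squares_in_rectangle h width == n)).map
        (fun width => (h, width))).foldl
      (fun best hw =>
        match best with
        | none => some hw
        | some (bh, bw) => if |hw.1 - hw.2| < |bw - bh| then some hw else best) best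
    = (if 0 ≤ n - PySem.Int.floordiv (h * (h + 1) * (2 * h + 1)) 6 ∧
          PySem.Int.mod (n - PySem.Int.floordiv (h * (h + 1) * (2 * h + 1)) 6)
            (PySem.Int.floordiv (h * (h + 1)) 2) = 0 then
        if h + PySem.Int.floordiv (n - PySem.Int.floordiv (h * (h + 1) * (2 * h + 1)) 6)
              (PySem.Int.floordiv (h * (h + 1)) 2) ≤ r then
          match best with
          | none =>
              some (h, h + PySem.Int.floordiv
                (n - PySem.Int.floordiv (h * (h + 1) * (2 * h + 1)) 6)
                (PySem.Int.floordiv (h * (h + 1)) 2))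
          | some (bh, bw) =>
              if h + PySem.Int.floordiv (n - PySem.Int.floordiv (h * (h + 1) * (2 * h + 1)) 6)
                    (PySem.Int.floordiv (h * (h + 1)) 2) - h < |bw - bh| then
                some (h, h + PySem.Int.floordiv
                  (n - PySem.Int.floordiv (h * (h + 1) * (2 * h + 1)) 6)
                  (PySem.Int.floordiv (h * (h + 1)) 2))
              else best
        else best
      else best) := by
  obtain ⟨ht0, htx⟩ := pv_t_spec h hh
  by_cases hsol : 0 ≤ n - PySem.Int.floordiv (h * (h + 1) * (2 * h + 1)) 6 ∧
      PySem.Int.mod (n - PySem.Int.floordiv (h * (h + 1) * (2 * h + 1)) 6)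
        (PySem.Int.floordiv (h * (h + 1)) 2) = 0
  · obtain ⟨hd0, hdm⟩ := hsol
    have hdvd := (PySem.Int.mod_eq_zero_iff_dvd _ _).mp hdm
    have htd : PySem.Int.floordiv (h * (h + 1)) 2 *
        PySem.Int.floordiv (n - PySem.Int.floordiv (h * (h + 1) * (2 * h + 1)) 6)
          (PySem.Int.floordiv (h * (h + 1)) 2)
        = n - PySem.Int.floordiv (h * (h + 1) * (2 * h + 1)) 6 := by
      rw [PySem.Int.floordiv_eq_ediv_of_pos ht0]
      exact Int.mul_ediv_cancel' hdvd
    have hfd0 : 0 ≤ PySem.Int.floordiv (n - PySem.Int.floordiv (h * (h + 1) * (2 * h + 1)) 6)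
        (PySem.Int.floordiv (h * (h + 1)) 2) := by nlinarith [htd]
    have hkey : ∀ w : ℤ, h ≤ w →
        (((count_squares_in_rectangle h w == n) = true) ↔
          w = h + PySem.Int.floordiv (n - PySem.Int.floordiv (h * (h + 1) * (2 * h + 1)) 6)
            (PySem.Int.floordiv (h * (h + 1)) 2)) := by
      intro w hwge
      rw [beq_iff_eq, pv_ct_affine n h w hh hwge]
      constructor
      · intro he
        have h1 : PySem.Int.floordiv (h * (h + 1)) 2 * (w - h)
            = PySem.Int.floordiv (h * (h + 1)) 2 *
              PySem.Int.floordiv (n - PySem.Int.floordiv (h * (h + 1) * (2 * h + 1)) 6)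
                (PySem.Int.floordiv (h * (h + 1)) 2) := by omega
        have h2 := mul_left_cancel₀ (by omega : PySem.Int.floordiv (h * (h + 1)) 2 ≠ 0) h1
        omega
      · intro he
        have h4 : PySem.Int.floordiv (h * (h + 1)) 2 * (w - h)
            = PySem.Int.floordiv (h * (h + 1)) 2 *
              PySem.Int.floordiv (n - PySem.Int.floordiv (h * (h + 1) * (2 * h + 1)) 6)
                (PySem.Int.floordiv (h * (h + 1)) 2) := by rw [he]; ring
        omega
    rw [if_pos ⟨hd0, hdm⟩]
    by_cases hr : h + PySem.Int.floordiv (n - PySem.Int.floordiv (h * (h + 1) * (2 * h + 1)) 6)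
        (PySem.Int.floordiv (h * (h + 1)) 2) ≤ r
    · have hcons := PySem.List.pyRange_one_cons (show h + PySem.Int.floordiv
          (n - PySem.Int.floordiv (h * (h + 1) * (2 * h + 1)) 6)
          (PySem.Int.floordiv (h * (h + 1)) 2) < r + 1 by omega)
      have hsplit := PySem.List.pyRange_one_append h
        (h + PySem.Int.floordiv (n - PySem.Int.floordiv (h * (h + 1) * (2 * h + 1)) 6)
          (PySem.Int.floordiv (h * (h + 1)) 2)) (r + 1) (by omega) (by omega)
      have hfilter : (PySem.List.pyRange h (r + 1) 1).filter
          (fun width => count_squares_in_rectangle h width == n)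
          = [h + PySem.Int.floordiv (n - PySem.Int.floordiv (h * (h + 1) * (2 * h + 1)) 6)
              (PySem.Int.floordiv (h * (h + 1)) 2)] := by
        have hp := (hkey _ (by omega)).mpr rfl
        have hnil1 : ∀ w ∈ PySem.List.pyRange h (h + PySem.Int.floordiv
            (n - PySem.Int.floordiv (h * (h + 1) * (2 * h + 1)) 6)
            (PySem.Int.floordiv (h * (h + 1)) 2)) 1,
            ¬((count_squares_in_rectangle h w == n) = true) := by
          intro w hw
          obtain ⟨hw1, hw2⟩ := PySem.List.mem_pyRange_one.mp hw
          intro hc; exact absurd ((hkey w hw1).mp hc) (by omega)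
        have hnil2 : ∀ w ∈ PySem.List.pyRange (h + PySem.Int.floordiv
            (n - PySem.Int.floordiv (h * (h + 1) * (2 * h + 1)) 6)
            (PySem.Int.floordiv (h * (h + 1)) 2) + 1) (r + 1) 1,
            ¬((count_squares_in_rectangle h w == n) = true) := by
          intro w hw
          obtain ⟨hw1, hw2⟩ := PySem.List.mem_pyRange_one.mp hw
          intro hc; exact absurd ((hkey w (by omega)).mp hc) (by omega)
        rw [hsplit, hcons, List.filter_append, List.filter_eq_nil_iff.mpr hnil1,
          List.filter_cons_of_pos (p := fun width => count_squares_in_rectangle h width == n) hp,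
          List.filter_eq_nil_iff.mpr hnil2]
        rfl
      rw [hfilter, if_pos hr]
      have habs : |h - (h + PySem.Int.floordiv
          (n - PySem.Int.floordiv (h * (h + 1) * (2 * h + 1)) 6)
          (PySem.Int.floordiv (h * (h + 1)) 2))|
          = h + PySem.Int.floordiv (n - PySem.Int.floordiv (h * (h + 1) * (2 * h + 1)) 6)
              (PySem.Int.floordiv (h * (h + 1)) 2) - h := by
        rw [abs_sub_comm]; exact abs_of_nonneg (by omega)
      cases best with
      | none => rfl
      | some p =>
        obtain ⟨bh, bw⟩ := p
        simp only [List.map_cons, List.map_nil, List.foldl_cons, List.foldl_nil, habs]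
    · have hfilter : (PySem.List.pyRange h (r + 1) 1).filter
          (fun width => count_squares_in_rectangle h width == n) = [] := by
        refine List.filter_eq_nil_iff.mpr fun w hw hc => ?_
        obtain ⟨hw1, hw2⟩ := PySem.List.mem_pyRange_one.mp hw
        exact absurd ((hkey w hw1).mp hc) (by omega)
      rw [hfilter, if_neg hr]
      rfl
  · have hfilter : (PySem.List.pyRange h (r + 1) 1).filter
        (fun width => count_squares_in_rectangle h width == n) = [] := by
      refine List.filter_eq_nil_iff.mpr fun w hw hc => ?_
      obtain ⟨hw1, hw2⟩ := PySem.List.mem_pyRange_one.mp hw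
      rw [beq_iff_eq, pv_ct_affine n h w hh hw1] at hc
      refine hsol ⟨by nlinarith [hc, ht0], ?_⟩
      exact (PySem.Int.mod_eq_zero_iff_dvd _ _).mpr ⟨w - h, by omega⟩
    rw [hfilter, if_neg hsol]
    rfl

theorem area_closest_square_spec : Claim_equal_area_closest_square := by
  intro n _ hn
  have hn' : 1 ≤ n := hn
  unfold Spec_area_closest_square area_closest_square area_closest_square_alt
    rectangles_with_exactly_n_squares
  rw [if_neg (by omega), if_neg (by omega)]
  simp only []
  rw [List.foldl_flatMap]
  congr 1
  refine PySem.List.foldl_congr_mem _ _ _ _ fun best h hmem => ?_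
  obtain ⟨hh, _⟩ := PySem.List.mem_pyRange_one.mp hmem
  exact pv_inner n (Int.sqrt n) h hh best
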